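-- pv_equiv track=rewrite | github.com/EducationalTestingService/rstfinder | discourseparsing/discourse_segmentation.py | extract_edus_tokens
-- ===== SOURCE A (Python) =====
-- def extract_edus_tokens(edu_start_indices, tokens_doc):
--     """
--     Extract tokens corresponding given to the given EDU indices.
--
--     Parameters
--     ----------
--     edu_start_indices : list
--         List of list of indices, one list for each EDU.
--     tokens_doc : list
--         List of list of tokens in the given document, one list per sentence.
--         The tokens can be either word tokens or part-of-speech tags or any
--         other tokens that have a one-to-one correspondence with the word
--         tokens.
--
--     Returns
--     -------
--     tokens_list : list
--         List of list of tokens corresponding to each EDU.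
--
--     Raises
--     ------
--     ValueError
--         If an EDU crosses sentence boundaries.
--     """
--     res = []
--
--     # check for blank input.
--     if not edu_start_indices:
--         return res
--
--     # add a dummy index pair representing the end of the document
--     tmp_indices = edu_start_indices + [[edu_start_indices[-1][0] + 1,
--                                         0,
--                                         edu_start_indices[-1][2] + 1]]
--
--     for ((prev_sent_index, prev_tok_index, prev_edu_index),
--          (sent_index, tok_index, _)) in zip(tmp_indices,
--                                             tmp_indices[1:]):
--         if sent_index == prev_sent_index and tok_index > prev_tok_index:
--             res.append(tokens_doc[prev_sent_index][prev_tok_index:tok_index])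
--         elif sent_index > prev_sent_index and tok_index == 0:
--             res.append(tokens_doc[prev_sent_index][prev_tok_index:])
--         else:
--             raise ValueError((f"An EDU ({prev_edu_index}) crosses sentences: "
--                               f"(sent {prev_sent_index}, tok {prev_tok_index}) "
--                               f"=> (sent {sent_index}, tok {tok_index})"))
--     return res
-- ===== SOURCE B (Python) =====
-- def _group_by_sentence(rows):
--     """Recursively chunk the start triples into maximal runs with equal
--     sentence index (consecutive rows of the same sentence)."""
--     if not rows:
--         return []
--     rest = _group_by_sentence(rows[1:])
--     if rest and rest[0][0][0] == rows[0][0]: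
--         return [[rows[0]] + rest[0]] + rest[1:]
--     return [[rows[0]]] + rest
--
--
-- def extract_edus_tokens(edu_start_indices, tokens_doc):
--     """Group the start triples by sentence first, then per group emit the
--     slices between consecutive token starts plus a final slice to the end
--     of the sentence, validating each group boundary."""
--     groups = _group_by_sentence(edu_start_indices)
--     res = []
--     for i, group in enumerate(groups):
--         sent = group[0][0]
--         sentence = tokens_doc[sent]
--         if i + 1 < len(groups):
--             nsent, ntok, _ = groups[i + 1][0]
--             if not (nsent > sent and ntok == 0):
--                 lsent, ltok, ledu = group[-1]
--                 raise ValueError(f"An EDU ({ledu}) crosses sentences: "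
--                                  f"(sent {lsent}, tok {ltok}) "
--                                  f"=> (sent {nsent}, tok {ntok})")
--         for (_, tok, edu), (_, tok2, _) in zip(group, group[1:]):
--             if not tok2 > tok:
--                 raise ValueError(f"An EDU ({edu}) crosses sentences: "
--                                  f"(sent {sent}, tok {tok}) "
--                                  f"=> (sent {sent}, tok {tok2})")
--             res.append(sentence[tok:tok2])
--         res.append(sentence[group[-1][1]:])
--     return res
-- ===== Notes on version B (the rewrite author's own statement) =====
-- stated objective: alternative
-- what changed: Replaces A's sentinel row + pairwise zip over all triples by a two-stage algorithm: first recursively chunk the start triples into maximal same-sentence groups, then per group emit the slices between consecutive token starts plus a final slice to the sentence end, validating each group boundary.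
import Mathlib
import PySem

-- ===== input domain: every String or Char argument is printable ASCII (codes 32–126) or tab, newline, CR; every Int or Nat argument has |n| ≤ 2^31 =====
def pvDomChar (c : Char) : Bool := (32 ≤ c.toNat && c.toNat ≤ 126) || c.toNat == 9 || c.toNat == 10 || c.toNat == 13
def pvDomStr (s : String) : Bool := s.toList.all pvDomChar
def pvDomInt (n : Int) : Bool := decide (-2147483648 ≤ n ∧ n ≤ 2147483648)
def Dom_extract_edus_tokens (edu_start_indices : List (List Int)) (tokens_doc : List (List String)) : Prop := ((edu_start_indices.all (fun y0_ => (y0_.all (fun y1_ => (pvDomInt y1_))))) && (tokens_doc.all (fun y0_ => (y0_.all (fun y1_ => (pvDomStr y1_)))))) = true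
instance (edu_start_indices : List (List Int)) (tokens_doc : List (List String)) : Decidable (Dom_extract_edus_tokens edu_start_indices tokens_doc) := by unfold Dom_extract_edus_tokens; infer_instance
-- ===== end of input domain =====

-- B replaces A's sentinel row + pairwise zip by a two-stage algorithm: chunk the triples into
-- maximal same-sentence groups, then emit each group's slices (objective: alternative).

-- ===== PORT A =====
-- A's loop over zip(tmp_indices, tmp_indices[1:]) with accumulator res;
-- the ValueError branch (inputs excluded by Pre_) returns the accumulator.
def pvA_loop (pairs : List (List Int × List Int)) (tokens_doc : List (List String))
    (res : List (List String)) : List (List String) :=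
  match pairs with
  | [] => res
  | (p, c) :: rest =>
    let ps := PySem.List.pyGetD p 0 0
    let pt := PySem.List.pyGetD p 1 0
    let s := PySem.List.pyGetD c 0 0
    let t := PySem.List.pyGetD c 1 0
    if s = ps ∧ t > pt then
      pvA_loop rest tokens_doc
        (res ++ [PySem.List.slice (PySem.List.pyGetD tokens_doc ps []) (some pt) (some t)])
    else if s > ps ∧ t = 0 then
      pvA_loop rest tokens_doc
        (res ++ [PySem.List.slice (PySem.List.pyGetD tokens_doc ps []) (some pt) none])
    else res  -- raise ValueError (inputs excluded by Pre_)

def extract_edus_tokens (edu_start_indices : List (List Int)) (tokens_doc : List (List String)) : List (List String) :=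
  match edu_start_indices with
  | [] => []
  | _ :: _ =>
    let lastRow := PySem.List.pyGetD edu_start_indices (-1) []
    let sentinel : List Int :=
      [PySem.List.pyGetD lastRow 0 0 + 1, 0, PySem.List.pyGetD lastRow 2 0 + 1]
    let tmp := edu_start_indices ++ [sentinel]
    pvA_loop (tmp.zip (PySem.List.slice tmp (some 1) none)) tokens_doc []

-- ===== PORT B =====
-- _group_by_sentence: recursively chunk into maximal runs of equal sentence index
def pvGroupsCons (r : List Int) : List (List (List Int)) → List (List (List Int))
  | [] => [[r]]
  | g :: gs =>
    if PySem.List.pyGetD (PySem.List.pyGetD g 0 []) 0 0 = PySem.List.pyGetD r 0 0 then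
      (r :: g) :: gs
    else [r] :: g :: gs

def pvGroups : List (List Int) → List (List (List Int))
  | [] => []
  | r :: rs => pvGroupsCons r (pvGroups rs)

-- the inner loop over zip(group, group[1:]) plus the final slice-to-end append;
-- the ValueError branch (inputs excluded by Pre_) stops emitting
def pvEmit (sentence : List String) : List (List Int) → List (List String)
  | [] => []
  | [g] => [PySem.List.slice sentence (some (PySem.List.pyGetD g 1 0)) none]
  | a :: b :: rs =>
    if PySem.List.pyGetD b 1 0 > PySem.List.pyGetD a 1 0 then
      PySem.List.slice sentence (some (PySem.List.pyGetD a 1 0)) (some (PySem.List.pyGetD b 1 0)) ::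
        pvEmit sentence (b :: rs)
    else []  -- raise ValueError (inputs excluded by Pre_)

-- the outer loop over the groups, with the boundary validation against the next group
def pvGroupsLoop (tokens_doc : List (List String)) : List (List (List Int)) → List (List String)
  | [] => []
  | [g] =>
    pvEmit (PySem.List.pyGetD tokens_doc (PySem.List.pyGetD (PySem.List.pyGetD g 0 []) 0 0) []) g
  | g :: g2 :: gs =>
    let sent := PySem.List.pyGetD (PySem.List.pyGetD g 0 []) 0 0
    if PySem.List.pyGetD (PySem.List.pyGetD g2 0 []) 0 0 > sent ∧
        PySem.List.pyGetD (PySem.List.pyGetD g2 0 []) 1 0 = 0 then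
      pvEmit (PySem.List.pyGetD tokens_doc sent []) g ++ pvGroupsLoop tokens_doc (g2 :: gs)
    else []  -- raise ValueError (inputs excluded by Pre_)

def extract_edus_tokens_alt (edu_start_indices : List (List Int)) (tokens_doc : List (List String)) : List (List String) :=
  pvGroupsLoop tokens_doc (pvGroups edu_start_indices)

-- ===== PRECONDITION & SPEC =====
-- consecutive start triples stay in the same sentence with a strictly later token,
-- or move to a strictly later sentence starting at token 0
def pvStep (p c : List Int) : Prop :=
  (PySem.List.pyGetD c 0 0 = PySem.List.pyGetD p 0 0 ∧ PySem.List.pyGetD c 1 0 > PySem.List.pyGetD p 1 0) ∨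
  (PySem.List.pyGetD c 0 0 > PySem.List.pyGetD p 0 0 ∧ PySem.List.pyGetD c 1 0 = 0)

-- Pre_ = exactly the inputs where Python A returns: every row is a proper triple whose sentence
-- index is a valid index of tokens_doc (else unpacking/indexing raises), and consecutive rows
-- satisfy the in-sentence/next-sentence condition (else A raises its ValueError).
def Pre_extract_edus_tokens (edu_start_indices : List (List Int)) (tokens_doc : List (List String)) : Prop :=
  (∀ r ∈ edu_start_indices,
      r.length = 3 ∧ PySem.Raise.InRange tokens_doc.length (PySem.List.pyGetD r 0 0)) ∧
  (∀ pr ∈ edu_start_indices.zip edu_start_indices.tail, pvStep pr.1 pr.2)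

instance (edu_start_indices : List (List Int)) (tokens_doc : List (List String)) : Decidable (Pre_extract_edus_tokens edu_start_indices tokens_doc) := by
  unfold Pre_extract_edus_tokens pvStep; infer_instance

def pvWitness_extract_edus_tokens : List (List Int) × List (List String) :=
  ([[0, 0, 0], [0, 1, 1]], [["d"]])

def Spec_extract_edus_tokens (edu_start_indices : List (List Int)) (tokens_doc : List (List String)) (out : List (List String)) : Prop := out = extract_edus_tokens_alt edu_start_indices tokens_doc
instance (edu_start_indices : List (List Int)) (tokens_doc : List (List String)) (out : List (List String)) : Decidable (Spec_extract_edus_tokens edu_start_indices tokens_doc out) := by unfold Spec_extract_edus_tokens; infer_instance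

-- ===== CLAIM (what is proved, stated in full; the proofs are below) =====
def Claim_equal_extract_edus_tokens : Prop := ∀ (edu_start_indices : List (List Int)) (tokens_doc : List (List String)), Dom_extract_edus_tokens edu_start_indices tokens_doc → Pre_extract_edus_tokens edu_start_indices tokens_doc → Spec_extract_edus_tokens edu_start_indices tokens_doc (extract_edus_tokens edu_start_indices tokens_doc)

-- ===== LEMMAS AND PROOFS =====

-- proof helper: the prev-carrying accumulator loop, an intermediate form between the two ports
def pvCarry (tokens_doc : List (List String)) (prev_sent prev_tok : Int)
    (rest : List (List Int)) (res : List (List String)) : List (List String) :=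
  match rest with
  | [] => res ++ [PySem.List.slice (PySem.List.pyGetD tokens_doc prev_sent []) (some prev_tok) none]
  | c :: rs =>
    let s := PySem.List.pyGetD c 0 0
    let t := PySem.List.pyGetD c 1 0
    if s = prev_sent ∧ t > prev_tok then
      pvCarry tokens_doc s t rs
        (res ++ [PySem.List.slice (PySem.List.pyGetD tokens_doc prev_sent []) (some prev_tok) (some t)])
    else if s > prev_sent ∧ t = 0 then
      pvCarry tokens_doc s t rs
        (res ++ [PySem.List.slice (PySem.List.pyGetD tokens_doc prev_sent []) (some prev_tok) none])
    else res

-- A's zip loop equals the carry loop, given the chain condition and the sentinel facts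
lemma pvMain (td : List (List String)) (sent : List Int)
    (hS1 : PySem.List.pyGetD sent 1 0 = 0) :
    ∀ (rest : List (List Int)) (prev : List Int) (res : List (List String)),
      (∀ pr ∈ (prev :: rest).zip rest, pvStep pr.1 pr.2) →
      PySem.List.pyGetD sent 0 0 =
        PySem.List.pyGetD (((prev :: rest).getLast?).getD []) 0 0 + 1 →
      pvA_loop (((prev :: rest) ++ [sent]).zip (((prev :: rest) ++ [sent]).tail)) td res =
        pvCarry td (PySem.List.pyGetD prev 0 0) (PySem.List.pyGetD prev 1 0) rest res := by
  intro rest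
  induction rest with
  | nil =>
    intro prev res _ hS0
    simp only [List.getLast?_singleton, Option.getD_some] at hS0
    simp only [List.cons_append, List.nil_append, List.tail_cons, List.zip_cons_cons,
      List.zip_nil_right, pvA_loop, pvCarry, hS0, hS1]
    split_ifs with hA hB
    · omega
    · simp
    · exact absurd ⟨by omega, by simp⟩ hB
  | cons c rs ih =>
    intro prev res hchain hS0
    have hstep : pvStep prev c := hchain (prev, c) (by simp)
    have hchain' : ∀ pr ∈ (c :: rs).zip rs, pvStep pr.1 pr.2 := by
      intro pr hpr
      exact hchain pr (by simp [List.zip_cons_cons]; right; exact hpr)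
    have hS0' : PySem.List.pyGetD sent 0 0 =
        PySem.List.pyGetD (((c :: rs).getLast?).getD []) 0 0 + 1 := by
      rwa [List.getLast?_cons_cons] at hS0
    simp only [List.cons_append, List.tail_cons, List.zip_cons_cons]
    rw [pvA_loop, pvCarry]
    rcases hstep with ⟨h1, h2⟩ | ⟨h1, h2⟩
    · rw [if_pos ⟨h1, h2⟩, if_pos ⟨h1, h2⟩]
      exact ih c _ hchain' hS0'
    · have hne : ¬ (PySem.List.pyGetD c 0 0 = PySem.List.pyGetD prev 0 0 ∧
          PySem.List.pyGetD c 1 0 > PySem.List.pyGetD prev 1 0) := by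
        intro h; omega
      rw [if_neg hne, if_pos ⟨h1, h2⟩, if_neg hne, if_pos ⟨h1, h2⟩]
      exact ih c _ hchain' hS0'

-- the first group of pvGroups (r :: rs) starts with r
lemma pvGroups_head (r : List Int) (rs : List (List Int)) :
    ∃ g gs, pvGroups (r :: rs) = (r :: g) :: gs := by
  rw [pvGroups]
  match h : pvGroups rs with
  | [] => exact ⟨[], [], rfl⟩
  | g :: gs =>
    by_cases hc : PySem.List.pyGetD (PySem.List.pyGetD g 0 []) 0 0 = PySem.List.pyGetD r 0 0
    · exact ⟨g, gs, by rw [pvGroupsCons, if_pos hc]⟩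
    · exact ⟨[], g :: gs, by rw [pvGroupsCons, if_neg hc]⟩

-- boundary property of the groups of a chain: adjacent groups' heads step to a later sentence at token 0
def pvBoundaryOK (gps : List (List (List Int))) : Prop :=
  ∀ pr ∈ gps.zip gps.tail,
    PySem.List.pyGetD (PySem.List.pyGetD pr.2 0 []) 0 0 >
      PySem.List.pyGetD (PySem.List.pyGetD pr.1 0 []) 0 0 ∧
    PySem.List.pyGetD (PySem.List.pyGetD pr.2 0 []) 1 0 = 0

lemma pvHead_cons (x : List Int) (xs : List (List Int)) :
    PySem.List.pyGetD (x :: xs) 0 [] = x := by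
  simp [PySem.List.pyGetD, PySem.List.pyGet?, PySem.List.pyIdx?]

lemma pvGroups_boundary : ∀ (rows : List (List Int)),
    (∀ pr ∈ rows.zip rows.tail, pvStep pr.1 pr.2) → pvBoundaryOK (pvGroups rows) := by
  intro rows
  induction rows with
  | nil => intro _ pr hpr; simp [pvGroups] at hpr
  | cons r rs ih =>
    intro hchain
    match rs, hchain with
    | [], _ => intro pr hpr; simp [pvGroups, pvGroupsCons] at hpr
    | c :: rs', hchain =>
      have hstep : pvStep r c := hchain (r, c) (by simp)
      have hchain' : ∀ pr ∈ (c :: rs').zip (c :: rs').tail, pvStep pr.1 pr.2 := by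
        intro pr hpr
        exact hchain pr (by simp [List.zip_cons_cons] at hpr ⊢; right; exact hpr)
      have hOK := ih hchain'
      obtain ⟨g, gs, hg⟩ := pvGroups_head c rs'
      rw [hg] at hOK
      rw [pvGroups, hg, pvGroupsCons, pvHead_cons]
      rcases hstep with ⟨h1, h2⟩ | ⟨h1, h2⟩
      · rw [if_pos h1]
        intro pr hpr
        match gs, hpr with
        | g2 :: gs', hpr =>
          simp only [List.tail_cons, List.zip_cons_cons, List.mem_cons] at hpr
          rcases hpr with hpr | hpr
          · have := hOK ((c :: g), g2) (by simp)
            subst hpr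
            simp only [pvHead_cons] at this ⊢
            rw [h1] at this
            exact this
          · exact hOK pr (by simp; right; exact hpr)
      · rw [if_neg (by omega)]
        intro pr hpr
        simp only [List.tail_cons, List.zip_cons_cons, List.mem_cons] at hpr
        rcases hpr with hpr | hpr
        · subst hpr
          simp only [pvHead_cons]
          exact ⟨h1, h2⟩
        · exact hOK pr hpr

-- prepending a same-sentence triple to the first group shifts one slice out of the grouped traversal
lemma pvGroupsLoop_cons (td : List (List String)) (e c : List Int) (g : List (List Int))
    (gs : List (List (List Int)))
    (h1 : PySem.List.pyGetD c 0 0 = PySem.List.pyGetD e 0 0)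
    (h2 : PySem.List.pyGetD c 1 0 > PySem.List.pyGetD e 1 0)
    (hOK : pvBoundaryOK ((c :: g) :: gs)) :
    pvGroupsLoop td ((e :: c :: g) :: gs) =
      PySem.List.slice (PySem.List.pyGetD td (PySem.List.pyGetD e 0 0) [])
        (some (PySem.List.pyGetD e 1 0)) (some (PySem.List.pyGetD c 1 0)) ::
      pvGroupsLoop td ((c :: g) :: gs) := by
  match gs with
  | [] =>
    simp only [pvGroupsLoop, pvHead_cons, h1]
    rw [pvEmit.eq_def]
    simp only []
    rw [if_pos h2]
  | g2 :: gs' =>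
    have hb := hOK ((c :: g), g2) (by simp)
    simp only [pvHead_cons] at hb
    rw [h1] at hb
    simp only [pvGroupsLoop, pvHead_cons, h1]
    rw [if_pos hb, if_pos hb]
    rw [pvEmit.eq_def]
    simp only []
    rw [if_pos h2]
    simp

-- the carry loop equals B's grouped traversal, given the chain condition
lemma pvCarry_groups (td : List (List String)) :
    ∀ (rest : List (List Int)) (e : List Int) (res : List (List String)),
      (∀ pr ∈ (e :: rest).zip rest, pvStep pr.1 pr.2) →
      pvCarry td (PySem.List.pyGetD e 0 0) (PySem.List.pyGetD e 1 0) rest res =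
        res ++ pvGroupsLoop td (pvGroups (e :: rest)) := by
  intro rest
  induction rest with
  | nil =>
    intro e res _
    simp [pvCarry, pvGroups, pvGroupsCons, pvGroupsLoop, pvEmit]
  | cons c rs ih =>
    intro e res hchain
    have hstep : pvStep e c := hchain (e, c) (by simp)
    have hchain' : ∀ pr ∈ (c :: rs).zip rs, pvStep pr.1 pr.2 := by
      intro pr hpr
      exact hchain pr (by simp [List.zip_cons_cons]; right; exact hpr)
    obtain ⟨g, gs, hg⟩ := pvGroups_head c rs
    have hOK : pvBoundaryOK ((c :: g) :: gs) := by
      rw [← hg]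
      exact pvGroups_boundary (c :: rs) (by
        intro pr hpr; exact hchain' pr (by simpa using hpr))
    rw [pvGroups, hg, pvGroupsCons, pvHead_cons]
    rcases hstep with ⟨h1, h2⟩ | ⟨h1, h2⟩
    · -- same sentence: c joins e's group
      rw [if_pos h1]
      rw [pvCarry]
      rw [if_pos ⟨h1, h2⟩]
      rw [ih c _ hchain', hg]
      rw [pvGroupsLoop_cons td e c g gs h1 h2 hOK]
      simp
    · -- new sentence: e starts its own group
      rw [if_neg (by omega)]
      rw [pvCarry]
      rw [if_neg (by intro h; omega), if_pos ⟨h1, h2⟩]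
      rw [ih c _ hchain', hg]
      simp only [pvGroupsLoop, pvHead_cons]
      rw [if_pos ⟨h1, h2⟩]
      simp [pvEmit]

-- ===== VERDICT (by name: the statement is the Claim_ definition above) =====
theorem extract_edus_tokens_spec : Claim_equal_extract_edus_tokens := by
  intro es td _ hpre
  unfold Spec_extract_edus_tokens
  match es with
  | [] => rfl
  | e :: rest =>
    simp only [extract_edus_tokens, extract_edus_tokens_alt]
    rw [PySem.List.slice_from_one]
    have hlast : PySem.List.pyGetD (e :: rest) (-1) [] = ((e :: rest).getLast?).getD [] := by
      rw [PySem.List.pyGetD_neg_one (e :: rest) [] (by simp)]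
      simp [List.getLast?_eq_some_getLast]
    rw [hlast]
    have hchain : ∀ pr ∈ (e :: rest).zip rest, pvStep pr.1 pr.2 := by simpa using hpre.2
    rw [pvMain td _ (by simp [PySem.List.pyGetD, PySem.List.pyGet?, PySem.List.pyIdx?])
      rest e [] hchain (by simp [PySem.List.pyGetD, PySem.List.pyGet?, PySem.List.pyIdx?])]
    simpa using pvCarry_groups td rest e [] hchain
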